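-- pv_equiv track=rewrite | github.com/edsimon/adventOfCode2018 | code/day5.py | filter_and_count
-- ===== SOURCE A (Python) =====
-- def check_equal(a, b) :
--     if (a.upper() == b.upper()) and not (a == b):
--         return True
--     else : return False
--
-- def filter_and_count( str ) :
--     i = 0
--     while i < len(str) - 1:
--         if (check_equal(str[i],str[i+1])) :
--             str = str[:i] + str[i + 2:]
--             i = max(0, i - 1)
--         else: i += 1
--     return len(str)
-- ===== SOURCE B (Python) =====
-- def filter_and_count(str):
--     stack = []
--     for c in str:
--         if stack and stack[-1] != c and stack[-1].upper() == c.upper():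
--             stack.pop()
--         else:
--             stack.append(c)
--     return len(stack)
-- ===== Notes on version B (the rewrite author's own statement) =====
-- stated objective: faster
-- what changed: Replaced the backtracking rescan loop that rebuilds the string on every reacting pair with a single left-to-right pass maintaining a stack (push each char, pop when it reacts with the top).
import Mathlib
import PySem

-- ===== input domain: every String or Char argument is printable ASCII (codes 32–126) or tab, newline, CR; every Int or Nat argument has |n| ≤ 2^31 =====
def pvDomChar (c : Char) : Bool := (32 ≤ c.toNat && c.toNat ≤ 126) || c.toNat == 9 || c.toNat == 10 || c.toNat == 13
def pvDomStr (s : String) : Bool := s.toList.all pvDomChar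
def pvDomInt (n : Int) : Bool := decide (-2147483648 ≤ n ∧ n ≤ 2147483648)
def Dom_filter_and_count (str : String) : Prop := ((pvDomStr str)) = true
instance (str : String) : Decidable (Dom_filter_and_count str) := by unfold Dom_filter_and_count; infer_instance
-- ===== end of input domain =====

-- B replaces A's quadratic backtracking rescan with a single-pass stack; same return value on every input.

-- ===== PORT A =====
-- port of check_equal; its arguments are the single-character strings str[i], str[i+1],
-- so it is a function of the two characters (upper of a 1-char ASCII string = upperChar)
def checkEqual (a b : Char) : Bool :=
  if (PySem.Chars.upperChar a == PySem.Chars.upperChar b) && !(a == b) then true else false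

-- A's while loop; i : Nat is faithful: Python's i starts at 0 and max(0, i-1) keeps it ≥ 0
-- (Nat's i - 1 IS max(0, i-1)); str[:i] + str[i+2:] on nonnegative indices is take/drop
-- (exact: PySem.List.slice_toNat); the guard keeps i and i+1 in range so getD is the plain index.
def loopA (fuel : Nat) (l : List Char) (i : Nat) : Int :=
  match fuel with
  | 0 => (l.length : Int)   -- never reached: each iteration lowers 2*len(str)-i, and the initial fuel exceeds it
  | fuel + 1 =>
    if i < l.length - 1 then
      if checkEqual (l.getD i ' ') (l.getD (i+1) ' ') then
        loopA fuel (l.take i ++ l.drop (i+2)) (i - 1)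
      else
        loopA fuel l (i+1)
    else
      (l.length : Int)

def filter_and_count (str : String) : Int := loopA (2 * str.toList.length + 1) str.toList 0

-- ===== PORT B =====
-- the stack is a List Char with the head as the top (Python appends/pops at the END of its list)
def stepB (stack : List Char) (c : Char) : List Char :=
  match stack with
  | [] => c :: stack
  | x :: rest =>
      if x != c && (PySem.Chars.upperChar x == PySem.Chars.upperChar c) then rest
      else c :: stack

def filter_and_count_alt (str : String) : Int :=
  ((str.toList.foldl stepB []).length : Int)

-- ===== PRECONDITION & SPEC =====
def Spec_filter_and_count (str : String) (out : Int) : Prop := out = filter_and_count_alt str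
instance (str : String) (out : Int) : Decidable (Spec_filter_and_count str out) := by unfold Spec_filter_and_count; infer_instance

-- ===== CLAIM (what is proved, stated in full; the proofs are below) =====
def Claim_equal_filter_and_count : Prop := ∀ (str : String), Dom_filter_and_count str → Spec_filter_and_count str (filter_and_count str)

-- ===== LEMMAS AND PROOFS =====

lemma checkEqual_eq (a b : Char) :
    checkEqual a b = ((PySem.Chars.upperChar a == PySem.Chars.upperChar b) && !(a == b)) := by
  cases h : ((PySem.Chars.upperChar a == PySem.Chars.upperChar b) && !(a == b)) with
  | true => simp [checkEqual, h]
  | false => simp [checkEqual, h]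

lemma stepB_pop {x c : Char} (st : List Char) (h : checkEqual x c = true) :
    stepB (x :: st) c = st := by
  rw [checkEqual_eq] at h
  simp only [stepB, bne]
  rw [if_pos (by rw [Bool.and_comm]; exact h)]

lemma stepB_push {x c : Char} (st : List Char) (h : checkEqual x c = false) :
    stepB (x :: st) c = c :: x :: st := by
  rw [checkEqual_eq] at h
  simp only [stepB, bne]
  rw [if_neg (by rw [Bool.and_comm]; simp [h])]

-- folding B's step over an irreducible stretch only pushes
lemma foldl_irred (p : List Char) : ∀ (st rest : List Char),
    List.IsChain (fun a b => checkEqual a b = false) (st.reverse ++ p) →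
    (p ++ rest).foldl stepB st = rest.foldl stepB (p.reverse ++ st) := by
  induction p with
  | nil => intro st rest _; simp
  | cons c t ih =>
    intro st rest hch
    have hpush : stepB st c = c :: st := by
      cases st with
      | nil => rfl
      | cons x st' =>
        have hb : checkEqual x c = false := by
          rcases (List.isChain_append).mp hch with ⟨_, _, hj⟩
          exact hj x (by simp) c (by simp)
        exact stepB_push st' hb
    have hch' : List.IsChain (fun a b => checkEqual a b = false) ((c :: st).reverse ++ t) := by
      simpa using hch
    calc ((c :: t) ++ rest).foldl stepB st
        = (t ++ rest).foldl stepB (c :: st) := by simp [hpush]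
      _ = rest.foldl stepB (t.reverse ++ (c :: st)) := ih (c :: st) rest hch'
      _ = rest.foldl stepB ((c :: t).reverse ++ st) := by simp

lemma foldl_irred_all (l : List Char)
    (h : List.IsChain (fun a b => checkEqual a b = false) l) :
    l.foldl stepB [] = l.reverse := by
  have := foldl_irred l [] [] (by simpa using h)
  simpa using this

-- removing a reacting pair just after an irreducible prefix does not change B's result
lemma foldl_remove (p t : List Char) (a b : Char)
    (hp : List.IsChain (fun x y => checkEqual x y = false) (p ++ [a]))
    (hr : checkEqual a b = true) :
    (p ++ a :: b :: t).foldl stepB [] = (p ++ t).foldl stepB [] := by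
  have hpI : List.IsChain (fun x y => checkEqual x y = false) p :=
    hp.prefix ⟨[a], rfl⟩
  have hpa : stepB p.reverse a = a :: p.reverse := by
    cases hpe : p.reverse with
    | nil => rfl
    | cons x st' =>
      have hx : checkEqual x a = false := by
        rcases (List.isChain_append).mp hp with ⟨_, _, hj⟩
        refine hj x ?_ a (by simp)
        have : p.getLast? = some x := by
          rw [← List.head?_reverse]; simp [hpe]
        simpa using this
      exact stepB_push st' hx
  rw [foldl_irred p [] (a :: b :: t) (by simpa using hpI),
      foldl_irred p [] t (by simpa using hpI)]
  simp only [List.append_nil, List.foldl_cons, hpa, stepB_pop p.reverse hr]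

-- the pointwise loop invariant of A: no reacting pair strictly before position i
def InvA (l : List Char) (i : Nat) : Prop :=
  ∀ j, j + 1 ≤ i → (h : j + 1 < l.length) → checkEqual l[j] l[j+1] = false

lemma loopA_eq_foldl : ∀ (fuel : Nat) (l : List Char) (i : Nat),
    2 * l.length - i < fuel → InvA l i →
    loopA fuel l i = ((l.foldl stepB []).length : Int) := by
  intro fuel
  induction fuel with
  | zero => intro l i hf _; omega
  | succ fuel ih =>
    intro l i hf hinv
    by_cases h : i < l.length - 1
    · by_cases hc : checkEqual (l.getD i ' ') (l.getD (i+1) ' ') = true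
      · have hlen : i + 1 < l.length := by omega
        have hi : i < l.length := by omega
        have hga : l.getD i ' ' = l[i] := List.getD_eq_getElem l ' ' hi
        have hgb : l.getD (i+1) ' ' = l[i+1] := List.getD_eq_getElem l ' ' hlen
        have hdec : l = l.take i ++ l[i] :: l[i+1] :: l.drop (i+2) := by
          conv_lhs => rw [← List.take_append_drop i l]
          congr 1
          rw [List.drop_eq_getElem_cons hi]
          congr 1
          rw [show i + 1 + 1 = i + 2 by omega] at *
          exact List.drop_eq_getElem_cons hlen
        have hpre : List.IsChain (fun x y => checkEqual x y = false) (l.take i ++ [l[i]]) := by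
          have : l.take i ++ [l[i]] = l.take (i+1) := (List.take_succ_eq_append_getElem hi).symm
          rw [this, List.isChain_iff_getElem]
          intro j hj
          simp only [List.length_take] at hj
          have hj1 : j + 1 < l.length := by omega
          have e1 : (l.take (i+1))[j] = l[j] := List.getElem_take
          have e2 : (l.take (i+1))[j+1] = l[j+1] := List.getElem_take
          rw [e1, e2]
          exact hinv j (by omega) hj1
        have hinv' : InvA (l.take i ++ l.drop (i+2)) (i - 1) := by
          intro j hj hjl
          have hji : j + 1 < i := by omega
          have hlt : j + 1 < (l.take i).length := by simp [List.length_take]; omega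
          have e1 : (l.take i ++ l.drop (i+2))[j] = l[j] := by
            rw [List.getElem_append_left (by omega)]; exact List.getElem_take
          have e2 : (l.take i ++ l.drop (i+2))[j+1] = l[j+1] := by
            rw [List.getElem_append_left hlt]; exact List.getElem_take
          rw [e1, e2]
          exact hinv j (by omega) (by simp [List.length_take] at hlt; omega)
        have hf' : 2 * (l.take i ++ l.drop (i+2)).length - (i - 1) < fuel := by
          simp only [List.length_append, List.length_take, List.length_drop]
          omega
        rw [loopA, if_pos h, if_pos hc, ih _ _ hf' hinv']
        congr 2
        conv_rhs => rw [hdec]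
        rw [foldl_remove (l.take i) (l.drop (i+2)) l[i] l[i+1] hpre
          (by rw [hga, hgb] at hc; exact hc)]
      · have hlen : i + 1 < l.length := by omega
        have hinv' : InvA l (i + 1) := by
          intro j hj hjl
          rcases Nat.lt_or_ge (j+1) (i+1) with hlt | hge
          · exact hinv j (by omega) hjl
          · have : j = i := by omega
            subst this
            rw [List.getD_eq_getElem l ' ' (by omega), List.getD_eq_getElem l ' ' hjl] at hc
            simpa using hc
        rw [loopA, if_pos h, if_neg (by simpa using hc)]
        exact ih _ _ (by omega) hinv'
    · have hch : List.IsChain (fun a b => checkEqual a b = false) l := by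
        rw [List.isChain_iff_getElem]
        intro j hj
        exact hinv j (by omega) hj
      rw [loopA, if_neg h, foldl_irred_all l hch]
      simp

-- ===== VERDICT (by name: the statement is the Claim_ definition above) =====
theorem filter_and_count_spec : Claim_equal_filter_and_count := by
  intro str _
  unfold Spec_filter_and_count filter_and_count filter_and_count_alt
  exact loopA_eq_foldl _ str.toList 0 (by omega) (fun j hj _ => by omega)
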